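-- pv_equiv track=rewrite | github.com/terradue-ogc-tb16/repo2cli | src/module/cookiecutter-nb-blueprint/{{cookiecutter.project_slug}}/src/package/ades/cwl.py | get_param_type
-- ===== SOURCE A (Python) =====
-- def get_param_type(param_signature):
--
--     param_type = None
--
--     if not all(elem in list(param_signature) for elem in ['min_occurs', 'max_occurs']):
--
--         # if not set, add the key and its default value
--
--         if not 'min_occurs' in param_signature.keys():
--
--             param_signature['min_occurs'] = 1
--
--         if not 'max_occurs' in param_signature.keys():
--
--             param_signature['max_occurs'] = 2
--
--     # cast to int
--     param_signature['min_occurs'] = int(param_signature['min_occurs'])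
--     param_signature['max_occurs'] = int(param_signature['max_occurs'])
--
--     if (param_signature['min_occurs'] == 0) & (param_signature['max_occurs'] == 1):
--
--         param_type = 'string?'
--
--     if (param_signature['min_occurs'] == 0) & (param_signature['max_occurs'] > 1):
--
--         param_type = 'string[]?'
--
--     if (param_signature['min_occurs'] == 1) & (param_signature['max_occurs'] == 1):
--
--         param_type = 'string'
--
--     if (param_signature['min_occurs'] == 1) & (param_signature['max_occurs'] > 1):
--
--         param_type = 'string[]'
--
--     if (param_signature['min_occurs'] > 1) & (param_signature['max_occurs'] > 1):
--
--         param_type = 'string[]'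
--
--     return param_type
-- ===== SOURCE B (Python) =====
-- def get_param_type(param_signature):
--     # same normalisation side effects as A: add defaults, cast to int in place
--     if 'min_occurs' not in param_signature:
--         param_signature['min_occurs'] = 1
--     if 'max_occurs' not in param_signature:
--         param_signature['max_occurs'] = 2
--     param_signature['min_occurs'] = int(param_signature['min_occurs'])
--     param_signature['max_occurs'] = int(param_signature['max_occurs'])
--     m = param_signature['min_occurs']
--     x = param_signature['max_occurs']
--     if m < 0 or x < 1 or (x == 1 and m > 1):
--         return None
--     return 'string' + ('[]' if x > 1 else '') + ('?' if m == 0 else '')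
-- ===== Notes on version B (the rewrite author's own statement) =====
-- stated objective: simpler
-- what changed: Replaces A's five independent if-overwrites on (min,max) pairs with one validity guard plus building the type string compositionally: 'string' + '[]' when max>1 + '?' when min==0.
import Mathlib
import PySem

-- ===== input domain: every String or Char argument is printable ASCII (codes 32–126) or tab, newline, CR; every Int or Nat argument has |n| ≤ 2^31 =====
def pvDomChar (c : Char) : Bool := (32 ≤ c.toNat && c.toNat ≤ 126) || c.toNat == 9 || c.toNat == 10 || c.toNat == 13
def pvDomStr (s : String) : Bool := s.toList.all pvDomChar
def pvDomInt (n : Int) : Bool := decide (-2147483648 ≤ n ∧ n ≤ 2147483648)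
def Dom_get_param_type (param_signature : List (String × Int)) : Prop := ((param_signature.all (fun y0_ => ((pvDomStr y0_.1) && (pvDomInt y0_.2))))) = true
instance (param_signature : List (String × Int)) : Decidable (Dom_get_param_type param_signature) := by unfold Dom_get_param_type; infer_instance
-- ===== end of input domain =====

-- B replaces A's five independent if-overwrites with one validity guard plus building the
-- type string compositionally ('string' + '[]' when max>1 + '?' when min==0) — simpler, same cost.
-- ===== PORT A =====
-- Note: the Python A mutates its dict argument in place (adds default keys, int-casts);
-- B performs the same mutation; the equivalence proved here is about the RETURN value.
def get_param_type (param_signature : List (String × Int)) : Option String :=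
  let d := PySem.Dict.ofList param_signature
  let param_type : Option String := none
  let d :=
    if ¬ (["min_occurs", "max_occurs"].all (fun elem => d.keys.contains elem)) then
      let d := if ¬ (d.contains "min_occurs") then d.insert "min_occurs" 1 else d
      let d := if ¬ (d.contains "max_occurs") then d.insert "max_occurs" 2 else d
      d
    else d
  -- cast to int: int() on an int value is the identity; keys are present here
  let d := d.insert "min_occurs" (d.getD "min_occurs" 0)
  let d := d.insert "max_occurs" (d.getD "max_occurs" 0)
  let mn := d.getD "min_occurs" 0
  let mx := d.getD "max_occurs" 0
  let param_type := if mn == 0 && mx == 1 then some "string?" else param_type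
  let param_type := if mn == 0 && mx > 1 then some "string[]?" else param_type
  let param_type := if mn == 1 && mx == 1 then some "string" else param_type
  let param_type := if mn == 1 && mx > 1 then some "string[]" else param_type
  let param_type := if mn > 1 && mx > 1 then some "string[]" else param_type
  param_type

-- ===== PORT B =====
def get_param_type_alt (param_signature : List (String × Int)) : Option String :=
  let d := PySem.Dict.ofList param_signature
  let d := if ¬ (d.contains "min_occurs") then d.insert "min_occurs" 1 else d
  let d := if ¬ (d.contains "max_occurs") then d.insert "max_occurs" 2 else d
  let d := d.insert "min_occurs" (d.getD "min_occurs" 0)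
  let d := d.insert "max_occurs" (d.getD "max_occurs" 0)
  let m := d.getD "min_occurs" 0
  let x := d.getD "max_occurs" 0
  if m < 0 || x < 1 || (x == 1 && m > 1) then none
  else some ("string" ++ (if x > 1 then "[]" else "") ++ (if m == 0 then "?" else ""))

-- ===== PRECONDITION & SPEC =====
def Spec_get_param_type (param_signature : List (String × Int)) (out : Option String) : Prop := out = get_param_type_alt param_signature
instance (param_signature : List (String × Int)) (out : Option String) : Decidable (Spec_get_param_type param_signature out) := by unfold Spec_get_param_type; infer_instance

-- ===== CLAIM (what is proved, stated in full; the proofs are below) =====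
def Claim_equal_get_param_type : Prop := ∀ (param_signature : List (String × Int)), Dom_get_param_type param_signature → Spec_get_param_type param_signature (get_param_type param_signature)

-- ===== LEMMAS AND PROOFS =====

-- The five-branch overwrite cascade of A equals B's guarded compositional string, for any ints.
lemma pv_cascade_eq (m x : Int) :
    (let p : Option String := none
     let p := if m == 0 && x == 1 then some "string?" else p
     let p := if m == 0 && x > 1 then some "string[]?" else p
     let p := if m == 1 && x == 1 then some "string" else p
     let p := if m == 1 && x > 1 then some "string[]" else p
     let p := if m > 1 && x > 1 then some "string[]" else p
     p)
    = (if m < 0 || x < 1 || (x == 1 && m > 1) then none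
       else some ("string" ++ (if x > 1 then "[]" else "") ++ (if m == 0 then "?" else ""))) := by
  simp only [beq_iff_eq, Bool.and_eq_true, Bool.or_eq_true, decide_eq_true_eq]
  split_ifs <;> simp_all <;> omega

-- The identity re-insert ("cast to int") does not change either lookup.
lemma pv_mn (d : PySem.Dict String Int) :
    ((d.insert "min_occurs" (d.getD "min_occurs" 0)).insert "max_occurs"
      ((d.insert "min_occurs" (d.getD "min_occurs" 0)).getD "max_occurs" 0)).getD "min_occurs" 0
    = d.getD "min_occurs" 0 := by
  simp [PySem.Dict.getD_insert]

lemma pv_mx (d : PySem.Dict String Int) :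
    ((d.insert "min_occurs" (d.getD "min_occurs" 0)).insert "max_occurs"
      ((d.insert "min_occurs" (d.getD "min_occurs" 0)).getD "max_occurs" 0)).getD "max_occurs" 0
    = (d.insert "min_occurs" (d.getD "min_occurs" 0)).getD "max_occurs" 0 := by
  simp [PySem.Dict.getD_insert]

-- ===== VERDICT (by name: the statement is the Claim_ definition above) =====
theorem get_param_type_spec : Claim_equal_get_param_type := by
  intro ps _
  unfold Spec_get_param_type get_param_type get_param_type_alt
  have hall : (["min_occurs", "max_occurs"].all (fun e => (PySem.Dict.ofList ps).keys.contains e))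
      = ((PySem.Dict.ofList ps).contains "min_occurs" && (PySem.Dict.ofList ps).contains "max_occurs") := by
    simp [PySem.Dict.contains_eq_decide_mem_keys]
  simp only [hall]
  by_cases h1 : (PySem.Dict.ofList ps).contains "min_occurs" <;>
  by_cases h2 : (PySem.Dict.ofList ps).contains "max_occurs" <;>
  · simp only [h1, h2, Bool.and_self, Bool.and_true, Bool.and_false,
      not_true, ite_false, pv_mn, pv_mx]
    exact pv_cascade_eq _ _
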